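-- pv_equiv track=rewrite | github.com/DasNeuling/RohBot | RohBot/intents/NLPUtils.py | matchUtterance
-- ===== SOURCE A (Python) =====
-- import string
--
-- def matchUtterance(userText, sampleUtterance):
--     charsToRemove = string.punctuation.replace('%', '')
--     userText = ''.join(ch for ch in userText if ch not in charsToRemove)
--     sampleUtterance = ''.join(ch for ch in sampleUtterance if ch not in charsToRemove)
--
--     userText = userText.lower()
--     sampleUtterance = sampleUtterance.lower()
--
--     userWords = userText.split()
--     utterWords = sampleUtterance.split()
--
--     lenDiff = len(userWords) - len(utterWords)
--
--     # If user input is shorter, don't match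
--     if (lenDiff < 0):
--         return False
--
--     for startOffset in range(lenDiff + 1):
--         skip = False
--         for i, matchWord in enumerate(utterWords):
--             userWord = userWords[i + startOffset]
--             if (matchWord != '%s' and matchWord != userWord):
--                 skip = True
--                 break
--             # if i == len(utterWords) - 1:
--         if not skip:
--             return True
--     return False
-- ===== SOURCE B (Python) =====
-- import string
--
-- def matchUtterance(userText, sampleUtterance):
--     table = str.maketrans('', '', string.punctuation.replace('%', ''))
--     userWords = userText.translate(table).lower().split()
--     utterWords = sampleUtterance.translate(table).lower().split()
--     m = len(utterWords)
--     # One left-to-right pass (NFA simulation): states[j] is True iff the first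
--     # j pattern words match the last j user words processed so far.
--     states = [True] + [False] * m
--     if states[m]:
--         return True
--     for w in userWords:
--         states = [True] + [s and (p == '%s' or p == w)
--                            for p, s in zip(utterWords, states)]
--         if states[m]:
--             return True
--     return False
-- ===== Notes on version B (the rewrite author's own statement) =====
-- stated objective: alternative
-- what changed: A slides the pattern over every start offset and rescans the window with index arithmetic (nested loops); B makes a single left-to-right pass over the user words maintaining the set of currently-matched pattern-prefix lengths (NFA simulation), and normalizes via str.translate instead of a per-character generator join.
import Mathlib
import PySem

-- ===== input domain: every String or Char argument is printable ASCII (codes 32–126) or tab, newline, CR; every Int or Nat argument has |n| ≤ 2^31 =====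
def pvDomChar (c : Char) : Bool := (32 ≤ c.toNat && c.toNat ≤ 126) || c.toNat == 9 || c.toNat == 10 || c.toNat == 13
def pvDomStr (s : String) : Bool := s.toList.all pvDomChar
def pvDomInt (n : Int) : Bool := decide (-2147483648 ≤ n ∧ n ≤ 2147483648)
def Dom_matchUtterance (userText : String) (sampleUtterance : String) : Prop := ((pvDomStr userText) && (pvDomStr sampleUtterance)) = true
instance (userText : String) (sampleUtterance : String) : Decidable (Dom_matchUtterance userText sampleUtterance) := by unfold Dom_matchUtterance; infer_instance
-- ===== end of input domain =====

-- B replaces A's offset-by-offset window scan with a single left-to-right pass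
-- maintaining the set of matched pattern-prefix lengths (NFA simulation) and
-- normalizes via str.translate; same return value, measured faster by a constant factor.

-- string.punctuation
def pvPunctuation : String := "!\"#$%&'()*+,-./:;<=>?@[\\]^_`{|}~"

-- ===== PORT A =====
-- inner 'for i, matchWord in enumerate(utterWords)' with the break/skip flag;
-- returns the final value of 'skip'.  The index is carried explicitly (= enumerate).
-- Python would raise IndexError where pyGet? is none; unreachable under A's loop
-- bounds (i + startOffset < len(userWords)); we return the 'skip' arbitrary value true there.
def aScan (userWords : List String) (startOffset : Int) (i : Int) : List String → Bool
  | [] => false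
  | matchWord :: rest =>
    match PySem.List.pyGet? userWords (i + startOffset) with
    | none => true
    | some userWord =>
      if !(matchWord == "%s") && !(matchWord == userWord) then true
      else aScan userWords startOffset (i + 1) rest

-- outer 'for startOffset in range(lenDiff + 1)' with its early return
def aTry (utterWords userWords : List String) : List Int → Bool
  | [] => false
  | s :: rest =>
    if !(aScan userWords s 0 utterWords) then true
    else aTry utterWords userWords rest

def matchUtterance (userText : String) (sampleUtterance : String) : Bool :=
  let charsToRemove := PySem.Str.replace pvPunctuation "%" ""
  -- ''.join(ch for ch in s if ch not in charsToRemove)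
  let userText := String.ofList (userText.toList.filter (fun ch => !(charsToRemove.toList.contains ch)))
  let sampleUtterance := String.ofList (sampleUtterance.toList.filter (fun ch => !(charsToRemove.toList.contains ch)))
  let userWords := PySem.Str.split₀ (PySem.Str.lower userText)
  let utterWords := PySem.Str.split₀ (PySem.Str.lower sampleUtterance)
  let lenDiff : Int := (userWords.length : Int) - (utterWords.length : Int)
  if lenDiff < 0 then false
  else aTry utterWords userWords (PySem.List.pyRange 0 (lenDiff + 1) 1)

-- ===== PORT B =====
-- states = [True] + [s and (p == '%s' or p == w) for p, s in zip(utterWords, states)]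
def bStep (utterWords : List String) (w : String) (states : List Bool) : List Bool :=
  true :: (utterWords.zip states).map (fun ps => ps.2 && (ps.1 == "%s" || ps.1 == w))

-- 'for w in userWords: … if states[m]: return True' ; final 'return False'
def bLoop (utterWords : List String) (m : Nat) : List String → List Bool → Bool
  | [], _ => false
  | w :: ws, states =>
    let states' := bStep utterWords w states
    if states'.getD m false then true else bLoop utterWords m ws states'

def matchUtterance_alt (userText : String) (sampleUtterance : String) : Bool :=
  -- str.maketrans('', '', string.punctuation.replace('%','')) + translate = delete those chars
  let deleteChars := pvPunctuation.toList.filter (fun c => !(c == '%'))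
  let userWords := PySem.Str.split₀ (PySem.Str.lower (String.ofList (userText.toList.filter (fun ch => !(deleteChars.contains ch)))))
  let utterWords := PySem.Str.split₀ (PySem.Str.lower (String.ofList (sampleUtterance.toList.filter (fun ch => !(deleteChars.contains ch)))))
  let m := utterWords.length
  let states := true :: List.replicate m false
  if states.getD m false then true
  else bLoop utterWords m userWords states

-- ===== PRECONDITION & SPEC =====
def Spec_matchUtterance (userText : String) (sampleUtterance : String) (out : Bool) : Prop := out = matchUtterance_alt userText sampleUtterance
instance (userText : String) (sampleUtterance : String) (out : Bool) : Decidable (Spec_matchUtterance userText sampleUtterance out) := by unfold Spec_matchUtterance; infer_instance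

-- ===== CLAIM (what is proved, stated in full; the proofs are below) =====
def Claim_equal_matchUtterance : Prop := ∀ (userText : String) (sampleUtterance : String), Dom_matchUtterance userText sampleUtterance → Spec_matchUtterance userText sampleUtterance (matchUtterance userText sampleUtterance)

-- ===== LEMMAS AND PROOFS =====

-- one word of the pattern matches one user word
def mw (p w : String) : Bool := p == "%s" || p == w

-- the pattern matches the user words starting at position s (zip truncates at the pattern)
def winOK (P U : List String) (s : Nat) : Bool := (P.zip (U.drop s)).all (fun pq => mw pq.1 pq.2)

-- states[j] after processing pre: first j pattern words match the last j words of pre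
def sfx (P pre : List String) (j : Nat) : Bool :=
  decide (j ≤ pre.length) && ((P.take j).zip (pre.drop (pre.length - j))).all (fun pq => mw pq.1 pq.2)

theorem aScan_eq (P U : List String) (s i : Int) (hs : 0 ≤ s) (hi : 0 ≤ i)
    (hlen : (i + s).toNat + P.length ≤ U.length) :
    aScan U s i P = !((P.zip (U.drop (i + s).toNat)).all (fun pq => mw pq.1 pq.2)) := by
  induction P generalizing i with
  | nil => simp [aScan]
  | cons matchWord rest ih =>
    have hlt : (i + s).toNat < U.length := by simp at hlen; omega
    have hget : PySem.List.pyGet? U (i + s) = some U[(i + s).toNat] :=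
      PySem.List.pyGet?_eq_some_getElem U (by omega) (by omega)
    have htn : ((i + 1) + s).toNat = (i + s).toNat + 1 := by omega
    have hdrop : U.drop (i + s).toNat = U[(i + s).toNat] :: U.drop ((i + s).toNat + 1) :=
      List.drop_eq_getElem_cons hlt
    rw [aScan, hget, hdrop]
    by_cases hm : mw matchWord U[(i + s).toNat] = true
    · have h1 : (!(matchWord == "%s") && !(matchWord == U[(i + s).toNat])) = false := by
        simp [mw] at hm ⊢; tauto
      simp only [h1, Bool.false_eq_true, if_false]
      rw [ih (i + 1) (by omega) (by simp at hlen; omega), htn]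
      simp only [List.zip_cons_cons, List.all_cons, hm, Bool.true_and]
    · simp [mw] at hm
      have h1 : (!(matchWord == "%s") && !(matchWord == U[(i + s).toNat])) = true := by
        simp [hm.1, hm.2]
      have hz : mw matchWord U[(i + s).toNat] = false := by simp [mw, hm.1, hm.2]
      simp only [h1, if_true, List.zip_cons_cons, List.all_cons, hz, Bool.false_and, Bool.not_false]

theorem aTry_eq (P U : List String) (k : Nat) : ∀ (a b : Int), 0 ≤ a → b - a ≤ k →
    b + P.length ≤ U.length + 1 →
    (aTry P U (PySem.List.pyRange a b 1) = true ↔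
      ∃ n : Nat, a ≤ (n : Int) ∧ (n : Int) < b ∧ winOK P U n = true) := by
  induction k with
  | zero =>
    intro a b ha hk hb
    rw [PySem.List.pyRange_one_eq_nil (by omega)]
    simp [aTry]
    intro n h1 h2
    omega
  | succ k ih =>
    intro a b ha hk hb
    by_cases hba : b ≤ a
    · rw [PySem.List.pyRange_one_eq_nil (by omega)]
      simp [aTry]
      intro n h1 h2
      omega
    · rw [PySem.List.pyRange_one_cons (by omega), aTry]
      have hscan : aScan U a 0 P = !(winOK P U a.toNat) := by
        simpa [winOK] using aScan_eq P U a 0 ha le_rfl (by omega)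
      by_cases hw : winOK P U a.toNat = true
      · simp only [hscan, hw, Bool.not_true, Bool.not_false, if_true]
        constructor
        · intro _
          exact ⟨a.toNat, by omega, by omega, hw⟩
        · intro _
          trivial
      · rw [Bool.not_eq_true] at hw
        simp only [hscan, hw, Bool.not_false, Bool.not_true, Bool.false_eq_true, if_false]
        rw [ih (a + 1) b (by omega) (by omega) hb]
        constructor
        · rintro ⟨n, h1, h2, h3⟩
          exact ⟨n, by omega, h2, h3⟩
        · rintro ⟨n, h1, h2, h3⟩
          refine ⟨n, ?_, h2, h3⟩
          by_cases hn : (n : Int) = a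
          · exfalso
            have : n = a.toNat := by omega
            rw [this, hw] at h3
            exact Bool.false_ne_true h3
          · omega

theorem sfx_zero (P pre : List String) : sfx P pre 0 = true := by
  simp [sfx]

theorem sfx_succ (P pre : List String) (w : String) (j : Nat) (hj : j < P.length) :
    sfx P (pre ++ [w]) (j + 1) = (sfx P pre j && mw P[j] w) := by
  by_cases hp : j ≤ pre.length
  · have hlt : (pre ++ [w]).length - (j + 1) = pre.length - j := by
      simp only [List.length_append, List.length_cons, List.length_nil]
      omega
    have hdrop : (pre ++ [w]).drop (pre.length - j) = pre.drop (pre.length - j) ++ [w] :=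
      List.drop_append_of_le_length (by omega)
    have htake : P.take (j + 1) = P.take j ++ [P[j]] := by
      rw [List.take_add_one]
      simp [hj]
    have hzip : (P.take (j + 1)).zip (pre.drop (pre.length - j) ++ [w]) =
        (P.take j).zip (pre.drop (pre.length - j)) ++ [(P[j], w)] := by
      rw [htake]
      rw [List.zip_append (by simp; omega)]
      simp
    simp only [sfx, hlt, hdrop, hzip]
    simp [List.all_append, hp]
  · simp only [sfx]
    simp [hp, -List.append_eq]

theorem bStep_eq (P pre : List String) (w : String) :
    bStep P w ((List.range (P.length + 1)).map (sfx P pre)) =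
      (List.range (P.length + 1)).map (sfx P (pre ++ [w])) := by
  apply List.ext_getElem
  · simp [bStep]
  · intro i h1 h2
    match i with
    | 0 => simp [bStep, sfx_zero]
    | j + 1 =>
      have hj : j < P.length := by simp [bStep] at h1; omega
      have hz : j < (P.zip ((List.range (P.length + 1)).map (sfx P pre))).length := by
        simp; omega
      simp only [bStep, List.getElem_cons_succ, List.getElem_map, List.getElem_zip,
        List.getElem_range]
      rw [sfx_succ P pre w j hj]
      simp [mw]

theorem bLoop_eq (P : List String) : ∀ (rest pre : List String),
    bLoop P P.length rest ((List.range (P.length + 1)).map (sfx P pre)) = true ↔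
      ∃ n : Nat, 1 ≤ n ∧ n ≤ rest.length ∧ sfx P (pre ++ rest.take n) P.length = true := by
  intro rest
  induction rest with
  | nil =>
    intro pre
    simp [bLoop]
  | cons w ws ih =>
    intro pre
    simp only [bLoop]
    rw [bStep_eq]
    have hgetD : (((List.range (P.length + 1)).map (sfx P (pre ++ [w]))).getD P.length false) =
        sfx P (pre ++ [w]) P.length := by
      simp [List.getD_eq_getElem?_getD]
    rw [hgetD]
    by_cases hw : sfx P (pre ++ [w]) P.length = true
    · simp only [hw, if_true]
      constructor
      · intro _
        exact ⟨1, le_rfl, by simp, by simpa using hw⟩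
      · intro _
        trivial
    · rw [Bool.not_eq_true] at hw
      simp only [hw, Bool.false_eq_true, if_false]
      rw [ih (pre ++ [w])]
      constructor
      · rintro ⟨n, h1, h2, h3⟩
        refine ⟨n + 1, by omega, by simp; omega, ?_⟩
        simpa [List.append_assoc] using h3
      · rintro ⟨n, h1, h2, h3⟩
        cases n with
        | zero => omega
        | succ n' =>
          have h3' : sfx P ((pre ++ [w]) ++ ws.take n') P.length = true := by
            simpa [List.append_assoc] using h3
          cases n' with
          | zero =>
            exfalso
            simp only [List.take_zero, List.append_nil] at h3'
            rw [hw] at h3'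
            exact Bool.false_ne_true h3'
          | succ n'' =>
            exact ⟨n'' + 1, by omega, by simp at h2; omega, h3'⟩

theorem zip_take_len (P xs : List String) : P.zip (xs.take P.length) = P.zip xs := by
  induction P generalizing xs with
  | nil => simp
  | cons p ps ih =>
    cases xs with
    | nil => simp
    | cons x xs => simp [ih]

theorem sfx_le (P pre : List String) (j : Nat) (h : sfx P pre j = true) : j ≤ pre.length := by
  simp [sfx] at h
  exact h.1

theorem sfx_eq_winOK (P U : List String) (n : Nat) (hn : n ≤ U.length) (hm : P.length ≤ n) :
    sfx P (U.take n) P.length = winOK P U (n - P.length) := by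
  have hlen : (U.take n).length = n := by simp [hn]
  have hdt : (U.take n).drop (n - P.length) = (U.drop (n - P.length)).take P.length := by
    rw [List.drop_take]
    congr 1
    omega
  simp only [sfx, winOK, hlen, List.take_length, hdt, zip_take_len]
  simp [hm]

theorem bSide (P U : List String) :
    ((if (true :: List.replicate P.length false).getD P.length false then true
      else bLoop P P.length U (true :: List.replicate P.length false)) = true)
      ↔ ∃ n : Nat, n ≤ U.length ∧ sfx P (U.take n) P.length = true := by
  have hinit : (true :: List.replicate P.length false) =
      (List.range (P.length + 1)).map (sfx P []) := by
    apply List.ext_getElem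
    · simp
    · intro i h1 h2
      match i with
      | 0 => simp [sfx_zero]
      | j + 1 =>
        simp [sfx]
  have hgd : (true :: List.replicate P.length false).getD P.length false =
      sfx P [] P.length := by
    rw [hinit]
    simp [List.getD_eq_getElem?_getD]
  by_cases h0 : sfx P [] P.length = true
  · rw [hgd, if_pos h0]
    constructor
    · intro _
      exact ⟨0, by omega, by simpa using h0⟩
    · intro _
      rfl
  · rw [Bool.not_eq_true] at h0
    rw [hgd, h0, if_neg (by simp), hinit, bLoop_eq P U []]
    constructor
    · rintro ⟨n, h1, h2, h3⟩
      exact ⟨n, h2, by simpa using h3⟩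
    · rintro ⟨n, h2, h3⟩
      cases n with
      | zero =>
        exfalso
        simp only [List.take_zero] at h3
        rw [h0] at h3
        exact Bool.false_ne_true h3
      | succ n' => exact ⟨n' + 1, by omega, h2, by simpa using h3⟩

theorem aSide (P U : List String) :
    ((if ((U.length : Int) - (P.length : Int)) < 0 then false
      else aTry P U (PySem.List.pyRange 0 (((U.length : Int) - (P.length : Int)) + 1) 1)) = true)
      ↔ ∃ s : Nat, (s : Int) < (U.length : Int) - (P.length : Int) + 1 ∧ winOK P U s = true := by
  by_cases hcase : ((U.length : Int) - (P.length : Int)) < 0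
  · rw [if_pos hcase]
    simp only [Bool.false_eq_true, false_iff]
    rintro ⟨s, h1, _⟩
    omega
  · rw [if_neg hcase]
    rw [aTry_eq P U ((((U.length : Int) - (P.length : Int)) + 1)).toNat 0
      (((U.length : Int) - (P.length : Int)) + 1) le_rfl (by omega) (by omega)]
    constructor
    · rintro ⟨n, _, h2, h3⟩
      exact ⟨n, h2, h3⟩
    · rintro ⟨n, h2, h3⟩
      exact ⟨n, by omega, h2, h3⟩

theorem core (P U : List String) :
    (if ((U.length : Int) - (P.length : Int)) < 0 then false
     else aTry P U (PySem.List.pyRange 0 (((U.length : Int) - (P.length : Int)) + 1) 1)) =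
    (if (true :: List.replicate P.length false).getD P.length false then true
     else bLoop P P.length U (true :: List.replicate P.length false)) := by
  rw [Bool.eq_iff_iff, aSide, bSide]
  constructor
  · rintro ⟨s, h1, h2⟩
    refine ⟨s + P.length, by omega, ?_⟩
    rw [sfx_eq_winOK P U (s + P.length) (by omega) (by omega)]
    simpa using h2
  · rintro ⟨n, h1, h2⟩
    have hm : P.length ≤ n := le_trans (by simpa [h1] using sfx_le P (U.take n) P.length h2) (by omega)
    refine ⟨n - P.length, by omega, ?_⟩
    rw [← sfx_eq_winOK P U n h1 hm]
    exact h2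

-- ===== VERDICT (by name: the statement is the Claim_ definition above) =====
theorem matchUtterance_spec : Claim_equal_matchUtterance := by
  intro userText sampleUtterance _
  unfold Spec_matchUtterance
  have hchars : (PySem.Str.replace pvPunctuation "%" "").toList =
      pvPunctuation.toList.filter (fun c => !(c == '%')) := by decide
  simp only [matchUtterance, matchUtterance_alt, hchars]
  exact core _ _
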